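-- pv_equiv track=rewrite | github.com/Ventmaster/GFGPoTD | 24 Oct 24 - Modify the Array.py | modifyAndRearrangeArr
-- ===== SOURCE A (Python) =====
-- def modifyAndRearrangeArr (arr) :
--     #Complete the function
--     n = len(arr)
--     left, right = 0, 0
--
--     for i in range(n - 2):
--         if arr[i] == 0:
--             continue
--
--         if arr[i] == arr[i + 1]:
--             arr[i] *= 2
--             arr[i + 1] = 0
--
--     while right < n:
--         if arr[right] != 0:
--             arr[left], arr[right] = arr[right], arr[left]
--             left += 1
--
--         right += 1
--
--     return arr
-- ===== SOURCE B (Python) =====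
-- def modifyAndRearrangeArr(arr):
--     n = len(arr)
--
--     # same merge pass as the original (including its range(n-2) bound)
--     for i in range(n - 2):
--         if arr[i] == 0:
--             continue
--         if arr[i] == arr[i + 1]:
--             arr[i] *= 2
--             arr[i + 1] = 0
--
--     # compaction: gather nonzeros, then rewrite arr in place
--     nonzeros = [x for x in arr if x != 0]
--     arr[:len(nonzeros)] = nonzeros
--     for i in range(len(nonzeros), n):
--         arr[i] = 0
--
--     return arr
-- ===== Notes on version B (the rewrite author's own statement) =====
-- stated objective: idiomatic
-- what changed: The two-pointer in-place swap compaction is replaced by a gather-then-rewrite pass: collect the nonzero elements into a list, write them to the front of arr and zero-fill the tail (the merge loop with its range(n-2) bound is kept).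
import Mathlib
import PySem

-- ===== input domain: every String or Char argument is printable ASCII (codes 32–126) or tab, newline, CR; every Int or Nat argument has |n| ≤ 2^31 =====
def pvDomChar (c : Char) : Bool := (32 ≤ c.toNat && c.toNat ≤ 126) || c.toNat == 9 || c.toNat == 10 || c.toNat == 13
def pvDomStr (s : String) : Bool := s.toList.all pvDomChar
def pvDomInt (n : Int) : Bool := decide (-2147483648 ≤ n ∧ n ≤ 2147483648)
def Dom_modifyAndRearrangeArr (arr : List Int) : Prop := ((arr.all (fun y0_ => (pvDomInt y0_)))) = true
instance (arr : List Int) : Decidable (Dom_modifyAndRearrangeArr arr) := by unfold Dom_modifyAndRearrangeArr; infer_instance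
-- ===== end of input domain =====

-- B keeps A's merge pass but replaces the two-pointer swap compaction by a gather-nonzeros-then-zero-fill rewrite (idiomatic, same cost); equivalence is about the return value (in Python both mutate arr in place to the same contents).


-- ===== PORT A =====
-- one iteration of A's merge loop (every index produced by range(n-2) and its successor are in range, so getD is exact)
def pvMergeStepA (arr : List Int) (i : Nat) : List Int :=
  if arr.getD i 0 = 0 then arr
  else if arr.getD i 0 = arr.getD (i + 1) 0 then (arr.set i (2 * arr.getD i 0)).set (i + 1) 0
  else arr

-- A's while-loop: the two-pointer swap compaction (left, right, n stay nonnegative, so Nat is exact)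
def pvCompactLoopA (arr : List Int) (left right n : Nat) : List Int :=
  if _h : right < n then
    if arr.getD right 0 ≠ 0 then
      pvCompactLoopA ((arr.set left (arr.getD right 0)).set right (arr.getD left 0)) (left + 1) (right + 1) n
    else
      pvCompactLoopA arr left (right + 1) n
  else arr
termination_by n - right

def modifyAndRearrangeArr (arr : List Int) : List Int :=
  let n := arr.length
  let merged := (List.range (n - 2)).foldl pvMergeStepA arr
  pvCompactLoopA merged 0 0 n

-- ===== PORT B =====
-- B's merge loop, identical to A's by design
def pvMergeStepB (arr : List Int) (i : Nat) : List Int :=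
  if arr.getD i 0 = 0 then arr
  else if arr.getD i 0 = arr.getD (i + 1) 0 then (arr.set i (2 * arr.getD i 0)).set (i + 1) 0
  else arr

-- gather-then-rewrite compaction: nonzeros to the front, zero-fill the tail
def modifyAndRearrangeArr_alt (arr : List Int) : List Int :=
  let n := arr.length
  let merged := (List.range (n - 2)).foldl pvMergeStepB arr
  let nonzeros := merged.filter (fun x => x ≠ 0)
  nonzeros ++ List.replicate (n - nonzeros.length) 0

-- ===== PRECONDITION & SPEC =====
def Spec_modifyAndRearrangeArr (arr : List Int) (out : List Int) : Prop := out = modifyAndRearrangeArr_alt arr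
instance (arr : List Int) (out : List Int) : Decidable (Spec_modifyAndRearrangeArr arr out) := by unfold Spec_modifyAndRearrangeArr; infer_instance

-- ===== CLAIM (what is proved, stated in full; the proofs are below) =====
def Claim_equal_modifyAndRearrangeArr : Prop := ∀ (arr : List Int), Dom_modifyAndRearrangeArr arr → Spec_modifyAndRearrangeArr arr (modifyAndRearrangeArr arr)

-- ===== LEMMAS AND PROOFS =====

theorem pvMergeStep_eq : pvMergeStepA = pvMergeStepB := rfl

theorem pvMergeStepA_length (arr : List Int) (i : Nat) :
    (pvMergeStepA arr i).length = arr.length := by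
  unfold pvMergeStepA; split_ifs <;> simp

theorem pvMergeFold_length (l : List Nat) (arr : List Int) :
    (l.foldl pvMergeStepA arr).length = arr.length := by
  induction l generalizing arr with
  | nil => rfl
  | cons x xs ih => simp [List.foldl, ih, pvMergeStepA_length]

theorem pv_set_append_add {α : Type} (p l : List α) (j : Nat) (x : α) :
    (p ++ l).set (p.length + j) x = p ++ l.set j x := by
  rw [List.set_append, if_neg (by omega)]
  simp

-- invariant of A's two-pointer loop: the state is p ++ 0^k ++ r with left = |p| and right = |p| + k
theorem pvCompactLoopA_inv (r p : List Int) (k : Nat) :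
    pvCompactLoopA (p ++ List.replicate k 0 ++ r) p.length (p.length + k) (p.length + k + r.length)
      = p ++ r.filter (fun x => x ≠ 0) ++ List.replicate (k + (r.length - (r.filter (fun x => x ≠ 0)).length)) 0 := by
  induction r generalizing p k with
  | nil =>
    rw [pvCompactLoopA]
    simp
  | cons x r ih =>
    have hget : (p ++ List.replicate k 0 ++ (x :: r)).getD (p.length + k) 0 = x := by
      rw [List.append_assoc, List.getD_append_right _ _ _ _ (by omega)]
      simp
    rw [pvCompactLoopA, dif_pos (by simp), hget]
    by_cases hx : x = 0
    · rw [if_neg (by simp [hx])]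
      have hrepl : p ++ List.replicate k 0 ++ (x :: r) = p ++ List.replicate (k + 1) 0 ++ r := by
        simp [hx, List.replicate_succ']
      have h2 : p.length + k + 1 = p.length + (k + 1) := by omega
      have h3 : p.length + k + (x :: r).length = p.length + (k + 1) + r.length := by simp; omega
      rw [hrepl, h2, h3, ih p (k + 1)]
      simp [hx]
      have : (List.filter (fun x => !decide (x = 0)) r).length ≤ r.length :=
        List.length_filter_le _ _
      omega
    · rw [if_pos (by simpa using hx)]
      have hswap : ((p ++ List.replicate k 0 ++ (x :: r)).set p.length x).set (p.length + k)
          ((p ++ List.replicate k 0 ++ (x :: r)).getD p.length 0)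
          = (p ++ [x]) ++ List.replicate k 0 ++ r := by
        cases k with
        | zero =>
          have hgl : (p ++ List.replicate 0 0 ++ (x :: r)).getD p.length 0 = x := by simpa using hget
          rw [hgl]
          simp
        | succ k' =>
          have hgl : (p ++ List.replicate (k' + 1) 0 ++ (x :: r)).getD p.length 0 = 0 := by
            rw [List.append_assoc, List.getD_append_right _ _ _ _ (by omega)]
            simp [List.replicate_succ]
          rw [hgl, List.append_assoc]
          rw [show p.length = p.length + 0 from rfl, pv_set_append_add]
          rw [show p.length + 0 + (k' + 1) = p.length + (k' + 1) from by omega, pv_set_append_add]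
          simp [List.replicate_succ]
          rw [show (0 : Int) :: r = [0] ++ r from rfl, ← List.append_assoc,
            ← List.replicate_succ', List.replicate_succ, List.cons_append]
      rw [hswap]
      have h := ih (p ++ [x]) k
      simp only [List.length_append, List.length_cons, List.length_nil] at h
      rw [show p.length + k + 1 = p.length + 1 + k from by omega,
        show p.length + k + (x :: r).length = p.length + 1 + k + r.length from by simp; omega, h]
      simp [hx, List.append_assoc]

theorem pvCompactLoopA_closed (a : List Int) :
    pvCompactLoopA a 0 0 a.length
      = a.filter (fun x => x ≠ 0) ++ List.replicate (a.length - (a.filter (fun x => x ≠ 0)).length) 0 := by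
  simpa using pvCompactLoopA_inv a [] 0

-- ===== VERDICT (by name: the statement is the Claim_ definition above) =====
theorem modifyAndRearrangeArr_spec : Claim_equal_modifyAndRearrangeArr := by
  intro arr _
  show _ = _
  unfold modifyAndRearrangeArr modifyAndRearrangeArr_alt
  simp only [← pvMergeStep_eq]
  set merged := (List.range (arr.length - 2)).foldl pvMergeStepA arr with hm
  have hlen : merged.length = arr.length := pvMergeFold_length _ _
  rw [← hlen, pvCompactLoopA_closed]
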